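-- pv_equiv track=rewrite | github.com/JungWooChul/Python-Algorithm | 백준/Silver/11497. 통나무 건너뛰기/통나무 건너뛰기.py | jump_log
-- ===== SOURCE A (Python) =====
-- from collections import deque
--
-- def jump_log(N, length):
--     optimal = deque([])
--     check,answer = 0, 0
--     for l in length:
--         if check%2 == 0:
--             optimal.append(l)
--             try:
--                 answer = max(answer, abs(optimal[-1] - optimal[-2]))
--             except:
--                 pass
--         else:
--             optimal.appendleft(l)
--             try:
--                 answer = max(answer, abs(optimal[0] - optimal[1]))
--             except:
--                 pass
--         check += 1
--
--     try:
--         answer = max(answer, abs(optimal[-1] - optimal[0]))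
--     except:
--         pass
--
--     return answer
-- ===== SOURCE B (Python) =====
-- def jump_log(N, length):
--     evens, odds = [], []
--     for i, l in enumerate(length):
--         (odds if i % 2 else evens).append(l)
--     seq = odds[::-1] + evens
--     if not seq:
--         return 0
--     return max(abs(a - b) for a, b in zip(seq, seq[1:] + seq[:1]))
-- ===== Notes on version B (the rewrite author's own statement) =====
-- stated objective: simpler
-- what changed: A interleaves deque construction with incremental max-tracking and try/except index probes; B first splits the list by index parity into evens/odds, builds the zigzag row once as odds[::-1]+evens, then takes the max over all circular adjacent gaps in a single scan.
import Mathlib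
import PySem

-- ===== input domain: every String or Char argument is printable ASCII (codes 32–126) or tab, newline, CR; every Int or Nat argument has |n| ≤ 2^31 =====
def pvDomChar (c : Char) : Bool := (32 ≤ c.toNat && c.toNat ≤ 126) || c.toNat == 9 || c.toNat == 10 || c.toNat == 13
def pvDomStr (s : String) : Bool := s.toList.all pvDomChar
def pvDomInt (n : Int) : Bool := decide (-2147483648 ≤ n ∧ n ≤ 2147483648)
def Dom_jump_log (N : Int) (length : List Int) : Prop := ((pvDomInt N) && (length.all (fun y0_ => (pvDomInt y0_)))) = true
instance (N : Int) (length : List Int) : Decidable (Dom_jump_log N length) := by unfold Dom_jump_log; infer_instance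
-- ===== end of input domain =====

-- B replaces A's deque with incremental max-tracking by a plain build-then-scan:
-- split the list by index parity, form the zigzag row once, and take the max
-- over all circular adjacent gaps (objective: simpler decomposition, same cost).

-- ===== PORT A =====
-- loop body of A: even check appends right and compares the two rightmost,
-- odd check prepends left and compares the two leftmost; try/except = the
-- none branches of pyGet? (IndexError leaves answer unchanged)
def jumpStep (s : List Int × Int × Int) (l : Int) : List Int × Int × Int :=
  if PySem.Int.mod s.2.1 2 = 0 then
    let opt' := s.1 ++ [l]
    match PySem.List.pyGet? opt' (-1), PySem.List.pyGet? opt' (-2) with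
    | some a, some b => (opt', s.2.1 + 1, max s.2.2 |a - b|)
    | _, _ => (opt', s.2.1 + 1, s.2.2)
  else
    let opt' := l :: s.1
    match PySem.List.pyGet? opt' 0, PySem.List.pyGet? opt' 1 with
    | some a, some b => (opt', s.2.1 + 1, max s.2.2 |a - b|)
    | _, _ => (opt', s.2.1 + 1, s.2.2)

def jump_log (N : Int) (length : List Int) : Int :=
  let s := length.foldl jumpStep ([], 0, 0)
  match PySem.List.pyGet? s.1 (-1), PySem.List.pyGet? s.1 0 with
  | some a, some b => max s.2.2 |a - b|
  | _, _ => s.2.2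

-- ===== PORT B =====
-- loop body of B: route each element to odds/evens by index parity
def splitStep (p : List Int × List Int) (il : Int × Int) : List Int × List Int :=
  if PySem.Int.mod il.1 2 ≠ 0 then (p.1, p.2 ++ [il.2]) else (p.1 ++ [il.2], p.2)

def jump_log_alt (N : Int) (length : List Int) : Int :=
  let eo := (PySem.List.enumerate length 0).foldl splitStep ([], [])
  let seq := eo.2.reverse ++ eo.1
  if seq = [] then 0
  else
    match PySem.List.max?
        ((seq.zip (PySem.List.slice seq (some 1) none ++ PySem.List.slice seq none (some 1))).map
          (fun p => |p.1 - p.2|)) (fun y => y) with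
    | some v => v
    | none => 0  -- unreachable: seq ≠ [] so the zipped list is nonempty

-- ===== PRECONDITION & SPEC =====
def Spec_jump_log (N : Int) (length : List Int) (out : Int) : Prop := out = jump_log_alt N length
instance (N : Int) (length : List Int) (out : Int) : Decidable (Spec_jump_log N length out) := by unfold Spec_jump_log; infer_instance

-- ===== CLAIM (what is proved, stated in full; the proofs are below) =====
def Claim_equal_jump_log : Prop := ∀ (N : Int) (length : List Int), Dom_jump_log N length → Spec_jump_log N length (jump_log N length)

-- ===== LEMMAS AND PROOFS =====

-- elements of xs at even positions (pick true) / odd positions (pick false)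
def pick : Bool → List Int → List Int
  | _, [] => []
  | true, x :: xs => x :: pick false xs
  | false, _ :: xs => pick true xs

-- the list of adjacent gaps of s (no wraparound)
def adjDiffs : List Int → List Int
  | x :: y :: r => |x - y| :: adjDiffs (y :: r)
  | _ => []

-- the max adjacent gap of s (0 if fewer than two elements)
def maxAdj (s : List Int) : Int := (adjDiffs s).foldl max 0

lemma foldl_max_pull : ∀ (d : List Int) (b c : Int), List.foldl max (max b c) d = max (List.foldl max b d) c := by
  intro d
  induction d with
  | nil => intro b c; rfl
  | cons y t ih =>
    intro b c
    simp only [List.foldl_cons]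
    rw [show max (max b c) y = max (max b y) c by omega, ih]

lemma adjDiffs_nonneg : ∀ (s : List Int), ∀ x ∈ adjDiffs s, 0 ≤ x := by
  intro s
  induction s with
  | nil => simp [adjDiffs]
  | cons a t ih =>
    cases t with
    | nil => simp [adjDiffs]
    | cons b r =>
      intro x hx
      simp only [adjDiffs, List.mem_cons] at hx
      rcases hx with rfl | hx
      · exact abs_nonneg _
      · exact ih x hx

lemma adjDiffs_concat : ∀ (t : List Int) (x a : Int),
    adjDiffs (x :: t ++ [a]) = adjDiffs (x :: t) ++ [|(x :: t).getLast (by simp) - a|] := by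
  intro t
  induction t with
  | nil => intro x a; simp [adjDiffs]
  | cons y r ih =>
    intro x a
    simp only [List.cons_append, adjDiffs]
    rw [show y :: (r ++ [a]) = y :: r ++ [a] from rfl, ih y a]
    simp [List.getLast_cons]

lemma maxAdj_concat (t : List Int) (x a : Int) :
    maxAdj (x :: t ++ [a]) = max (maxAdj (x :: t)) |(x :: t).getLast (by simp) - a| := by
  unfold maxAdj
  rw [adjDiffs_concat, List.foldl_append]
  simp

lemma maxAdj_cons (x y : Int) (t : List Int) :
    maxAdj (x :: y :: t) = max (maxAdj (y :: t)) |x - y| := by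
  unfold maxAdj
  simp only [adjDiffs, List.foldl_cons]
  exact foldl_max_pull _ 0 _

lemma zip_wrap : ∀ (t : List Int) (x w : Int),
    ((x :: t).zip (t ++ [w])).map (fun p => |p.1 - p.2|)
      = adjDiffs (x :: t) ++ [|(x :: t).getLast (by simp) - w|] := by
  intro t
  induction t with
  | nil => intro x w; simp [adjDiffs]
  | cons y r ih =>
    intro x w
    simp only [List.cons_append, List.zip_cons_cons, List.map_cons, adjDiffs]
    rw [ih y w]
    simp

lemma max?_wrap (d : List Int) (w : Int) (hw : 0 ≤ w) (hd : ∀ x ∈ d, 0 ≤ x) :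
    PySem.List.max? (d ++ [w]) (fun y => y) = some (max (List.foldl max 0 d) w) := by
  cases d with
  | nil =>
    rw [List.nil_append, PySem.List.max?_id_cons]
    simp [max_eq_right hw]
  | cons y t =>
    rw [List.cons_append, PySem.List.max?_id_cons, List.foldl_append]
    have hy : max 0 y = y := max_eq_right (hd y (by simp))
    simp only [List.foldl_cons, hy, List.foldl_cons]
    simp

-- parity flip for Python's check % 2
lemma mod2_flip (c : Int) : PySem.Int.mod (c + 1) 2 = 0 ↔ ¬ (PySem.Int.mod c 2 = 0) := by
  rw [PySem.Int.mod_eq_emod_of_pos (a := c + 1) (by norm_num), PySem.Int.mod_eq_emod_of_pos (a := c) (by norm_num)]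
  omega

lemma split_fold : ∀ (xs : List Int) (i : Int) (ev od : List Int),
    (PySem.List.enumerate xs i).foldl splitStep (ev, od)
      = if PySem.Int.mod i 2 = 0 then (ev ++ pick true xs, od ++ pick false xs)
        else (ev ++ pick false xs, od ++ pick true xs) := by
  intro xs
  induction xs with
  | nil => intro i ev od; simp [PySem.List.enumerate_nil, pick]
  | cons x t ih =>
    intro i ev od
    rw [PySem.List.enumerate_cons, List.foldl_cons]
    by_cases h : PySem.Int.mod i 2 = 0
    · have h' : ¬ PySem.Int.mod (i + 1) 2 = 0 := fun hh => (mod2_flip i).mp hh h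
      rw [show splitStep (ev, od) (i, x) = (ev ++ [x], od) by simp only [splitStep]; rw [if_neg (not_not_intro h)],
          ih (i + 1) (ev ++ [x]) od, if_neg h', if_pos h]
      simp [pick]
    · have h' : PySem.Int.mod (i + 1) 2 = 0 := (mod2_flip i).mpr h
      rw [show splitStep (ev, od) (i, x) = (ev, od ++ [x]) by simp only [splitStep]; rw [if_pos h],
          ih (i + 1) ev (od ++ [x]), if_pos h', if_neg h]
      simp [pick]

lemma loopA : ∀ (xs : List Int) (y : Int) (t : List Int) (c ans : Int),
    ans = maxAdj (y :: t) →
    xs.foldl jumpStep (y :: t, c, ans)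
      = if PySem.Int.mod c 2 = 0
        then ((pick false xs).reverse ++ y :: t ++ pick true xs, c + xs.length,
              maxAdj ((pick false xs).reverse ++ y :: t ++ pick true xs))
        else ((pick true xs).reverse ++ y :: t ++ pick false xs, c + xs.length,
              maxAdj ((pick true xs).reverse ++ y :: t ++ pick false xs)) := by
  intro xs
  induction xs with
  | nil =>
    intro y t c ans hans
    subst hans
    simp only [List.foldl_nil, pick]
    split <;> simp
  | cons x xs ih =>
    intro y t c ans hans
    rw [List.foldl_cons]
    by_cases h : PySem.Int.mod c 2 = 0
    · have hstep : jumpStep (y :: t, c, ans) x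
          = (y :: (t ++ [x]), c + 1, max ans |x - (y :: t).getLast (by simp)|) := by
        have h2 : PySem.List.pyGet? ((y :: t) ++ [x]) (-2) = some ((y :: t).getLast (by simp)) := by
          rw [PySem.List.pyGet?_neg_ofNat _ 2 (by norm_num) (by simp)]
          rw [show ((y :: t) ++ [x]).length - 2 = (y :: t).length - 1 by simp,
              List.getElem?_append_left (by simp)]
          rw [← List.getLast?_eq_getElem?, List.getLast?_eq_some_getLast (by simp)]
        simp only [jumpStep, if_pos h, PySem.List.pyGet?_neg_one_append_singleton, h2]
        rfl
      rw [hstep, ih y (t ++ [x]) (c + 1) _ (by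
        rw [show maxAdj (y :: (t ++ [x])) = maxAdj (y :: t ++ [x]) from rfl, maxAdj_concat, hans,
            abs_sub_comm]),
        if_neg (fun hh => (mod2_flip c).mp hh h), if_pos h]
      simp only [pick, List.length_cons, Prod.mk.injEq]
      refine ⟨by simp, by push_cast; ring, by simp⟩
    · have hstep : jumpStep (y :: t, c, ans) x = (x :: y :: t, c + 1, max ans |x - y|) := by
        have h1 : PySem.List.pyGet? (x :: y :: t) 1 = some y := by
          rw [PySem.List.pyGet?_of_nonneg _ (by norm_num)]
          rfl
        simp only [jumpStep, if_neg h, PySem.List.pyGet?_zero_cons, h1]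
      rw [hstep, ih x (y :: t) (c + 1) _ (by rw [maxAdj_cons, hans]),
        if_pos ((mod2_flip c).mpr h), if_neg h]
      simp only [pick, List.length_cons, Prod.mk.injEq]
      refine ⟨by simp, by push_cast; ring, by simp⟩

lemma matchFinal (s0 : Int) (st : List Int) (m : Int) :
    (match PySem.List.pyGet? (s0 :: st) (-1), PySem.List.pyGet? (s0 :: st) 0 with
     | some a, some b => max m |a - b|
     | _, _ => m) = max m |(s0 :: st).getLast (by simp) - s0| := by
  rw [PySem.List.pyGet?_neg_one, List.getLast?_eq_some_getLast (by simp), PySem.List.pyGet?_zero_cons]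

-- ===== VERDICT (by name: the statement is the Claim_ definition above) =====
theorem jump_log_spec : Claim_equal_jump_log := by
  intro N length _
  unfold Spec_jump_log
  cases length with
  | nil => rfl
  | cons x rest =>
    have step1 : jumpStep ([], 0, 0) x = ([x], 1, 0) := by
      simp [jumpStep, PySem.List.pyGet?, PySem.List.pyIdx?]
    have hfold : (x :: rest).foldl jumpStep ([], 0, 0)
        = ((pick true rest).reverse ++ x :: pick false rest, 1 + (rest.length : Int),
           maxAdj ((pick true rest).reverse ++ x :: pick false rest)) := by
      rw [List.foldl_cons, step1, loopA rest x [] 1 0 rfl, if_neg (by decide)]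
      simp
    obtain ⟨s0, st, hS⟩ := List.exists_cons_of_ne_nil
      (show (pick true rest).reverse ++ x :: pick false rest ≠ [] by simp)
    have hA : jump_log N (x :: rest) = max (maxAdj (s0 :: st)) |(s0 :: st).getLast (by simp) - s0| := by
      unfold jump_log
      rw [hfold]
      simp only [hS, matchFinal]
    have heo : (PySem.List.enumerate (x :: rest) 0).foldl splitStep ([], [])
        = (x :: pick false rest, pick true rest) := by
      rw [split_fold, if_pos (by decide)]
      simp [pick]
    have hB : jump_log_alt N (x :: rest)
        = max (maxAdj (s0 :: st)) |(s0 :: st).getLast (by simp) - s0| := by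
      unfold jump_log_alt
      rw [heo]
      simp only []
      rw [hS, if_neg (by simp), PySem.List.slice_from_one,
          PySem.List.slice_to _ (by norm_num)]
      rw [show (s0 :: st).tail = st from rfl, show (s0 :: st).take (1 : Int).toNat = [s0] from rfl]
      rw [zip_wrap st s0 s0, max?_wrap _ _ (abs_nonneg _) (adjDiffs_nonneg _)]
      rfl
    rw [hA, hB]
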